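import Toy.Spec.Units.start
import ProgX.Base.Spec.Stub

/-!
  The stub `_start`, for the toy, FROM THE GENERIC THEOREM `ProgX.Base.Top.stub_reaches` (ProgX/Base/Spec/Stub.lean): what is
  left to a program is the precondition of its `prog_main` from `ProgX.Base.Top.MainPre`. (Toy/Spec/Proved/start.lean is the
  same statement proved by a walk of the stub, as a farm worker would do it.)
-/

open X86 X86.User Asan ProgX ProgX.Base Toy.Spec

namespace Toy.Spec.Proved.start_via_stub

/-- **`prog_main`'s precondition at the stub's call** (0x100035), from what the generic stub theorem gives of that state: the
input is IN (`len` bytes at 200000H), the output the first 8 bytes of OUT (400000H), both below the stack region; `weights` is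
one of the registered globals. -/
theorem sv_main_pre (len : Nat) (v : State) (h : Top.MainPre Toy.Globals.objs len v) :
    (Toy.Spec.prog_main.spec (Toy.Globals.objs ++ initialObjs len) []).pre v := by
  have hlen := h.len_le
  have e_rsi := h.rsi_toNat
  refine ⟨h.shadow, ?_, ?_, ?_, ?_, ?_⟩
  · -- len ≤ 1FF000H
    rw [e_rsi]
    exact hlen
  · -- the input: `len` bytes at 200000H, below the stack region
    right
    rw [e_rsi, h.rdi]
    refine ⟨Top.mainPre_live_in _ len, ?_⟩
    left
    show 0x200000 + len ≤ 0x700000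
    omega
  · -- the output: 8 bytes at 400000H
    rw [h.rdx]
    exact Top.mainPre_live_out _ len _ 8 (by decide) (by decide)
  · -- … below the stack region
    rw [h.rdx]
    left
    decide
  · -- `weights` is one of the registered globals
    apply List.mem_append_left
    decide

/-- `prog_main`'s 288 bytes of stack fit below the stub's `call` (FFFF8H bytes). -/
theorem sv_main_frame (len : Nat) : (Toy.Spec.prog_main.spec (Toy.Globals.objs ++ initialObjs len) []).frame ≤ 0xFFFF8 := by
  show 288 ≤ 0xFFFF8
  decide

end Toy.Spec.Proved.start_via_stub

/-- The stub `_start` reaches `prog_exit`, for the toy: the generic theorem, at the toy's runtime record and `prog_main`'s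
contract for the objects `Toy.Globals.objs ++ initialObjs len` and no protected frame. -/
theorem Toy.Spec.Proved.start_via_stub_ok : Toy.Spec.start.Statement := by
  intro Lay hLay μ hμ u₀ hcode h_rc h_pm
  exact Top.stub_reaches hLay hμ hcode Toy.Spec.rt rfl Toy.Globals.objs (by decide) (by decide) (by decide)
    (fun len => Toy.Spec.prog_main.spec (Toy.Globals.objs ++ initialObjs len) []) Toy.Spec.Proved.start_via_stub.sv_main_frame
    Toy.Spec.Proved.start_via_stub.sv_main_pre h_rc (fun len => h_pm _ _)
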